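-- pv_equiv track=rewrite | github.com/MR-B-WHSG/python-code | karma rogue-like/player.py | pick_cards_from_zone
-- ===== SOURCE A (Python) =====
-- def pick_cards_from_zone(zone, valid_indices, direction, ref_card, discard_pile):
--     if not valid_indices:
--         return []
--     valid_cards = [(i, zone[i]) for i in valid_indices]
--     # sort by rank descending
--     valid_cards.sort(key=lambda x: x[1][0], reverse=True)
--     chosen_rank = valid_cards[0][1][0]
--     same_rank_indices = [i for i, card in enumerate(zone) if card[0] == chosen_rank]
--     return same_rank_indices
-- ===== SOURCE B (Python) =====
-- def pick_cards_from_zone(zone, valid_indices, direction, ref_card, discard_pile):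
--     best = None
--     for i in valid_indices:
--         r = zone[i][0]
--         if best is None or r > best:
--             best = r
--     if best is None:
--         return []
--     out = []
--     j = 0
--     for rank, _suit in zone:
--         if rank == best:
--             out.append(j)
--         j += 1
--     return out
-- ===== Notes on version B (the rewrite author's own statement) =====
-- stated objective: simpler
-- what changed: Replaces A's pair-list construction plus descending stable sort and head extraction, and its enumerate-based comprehension, with a running-max accumulator loop over valid_indices followed by an explicit counter loop over zone appending matching indices.
import Mathlib
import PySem

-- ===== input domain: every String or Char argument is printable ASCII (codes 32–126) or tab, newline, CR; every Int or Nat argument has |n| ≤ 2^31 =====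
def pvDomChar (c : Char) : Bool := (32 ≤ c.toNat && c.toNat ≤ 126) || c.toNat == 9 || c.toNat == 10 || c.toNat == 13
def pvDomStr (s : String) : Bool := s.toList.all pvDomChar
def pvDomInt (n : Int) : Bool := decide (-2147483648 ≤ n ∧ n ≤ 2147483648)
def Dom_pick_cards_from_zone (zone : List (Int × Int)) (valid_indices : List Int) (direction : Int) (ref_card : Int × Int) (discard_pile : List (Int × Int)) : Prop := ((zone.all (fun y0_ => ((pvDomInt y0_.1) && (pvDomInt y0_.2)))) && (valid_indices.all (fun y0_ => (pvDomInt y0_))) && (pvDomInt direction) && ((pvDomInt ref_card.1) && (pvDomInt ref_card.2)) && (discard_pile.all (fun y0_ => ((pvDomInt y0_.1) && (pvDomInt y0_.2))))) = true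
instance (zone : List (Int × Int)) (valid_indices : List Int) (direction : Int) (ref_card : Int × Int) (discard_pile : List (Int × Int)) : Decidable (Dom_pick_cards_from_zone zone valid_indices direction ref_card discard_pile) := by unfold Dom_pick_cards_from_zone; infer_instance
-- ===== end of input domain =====

-- B drops A's pair list, descending sort and enumerate-comprehension: it keeps a running-max
-- accumulator over valid_indices and then collects matching indices with an explicit counter loop (simpler).

-- ===== PORT A =====
def pick_cards_from_zone (zone : List (Int × Int)) (valid_indices : List Int) (direction : Int) (ref_card : Int × Int) (discard_pile : List (Int × Int)) : List Int :=
  if valid_indices = [] then []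
  else
    -- valid_cards = [(i, zone[i]) for i in valid_indices]  (zone[i] total under Pre_)
    let valid_cards : List (Int × (Int × Int)) :=
      valid_indices.map (fun i => (i, PySem.List.pyGetD zone i (0, 0)))
    -- valid_cards.sort(key=lambda x: x[1][0], reverse=True)
    let sorted_cards := PySem.List.sorted valid_cards (fun x => x.2.1) true
    -- chosen_rank = valid_cards[0][1][0]
    let chosen_rank := (sorted_cards.headD (0, (0, 0))).2.1
    -- [i for i, card in enumerate(zone) if card[0] == chosen_rank]
    (PySem.List.enumerate zone 0).filterMap
      (fun p => if p.2.1 = chosen_rank then some p.1 else none)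

-- ===== PORT B =====
-- the running-max loop: for i in valid_indices: r = zone[i][0]; if best is None or r > best: best = r
def pickBestLoop (zone : List (Int × Int)) : List Int → Option Int → Option Int
  | [], best => best
  | i :: rest, best =>
      let r := (PySem.List.pyGetD zone i (0, 0)).1
      pickBestLoop zone rest
        (match best with
         | none => some r
         | some b => if r > b then some r else some b)

-- the counter loop: for rank, _suit in zone: if rank == best: out.append(j); j += 1
def pickCollectLoop (best : Int) : List (Int × Int) → Int → List Int
  | [], _ => []
  | (rank, _suit) :: rest, j =>
      if rank = best then j :: pickCollectLoop best rest (j + 1)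
      else pickCollectLoop best rest (j + 1)

def pick_cards_from_zone_alt (zone : List (Int × Int)) (valid_indices : List Int) (direction : Int) (ref_card : Int × Int) (discard_pile : List (Int × Int)) : List Int :=
  match pickBestLoop zone valid_indices none with
  | none => []
  | some best => pickCollectLoop best zone 0

-- ===== PRECONDITION & SPEC =====
-- Pre_ excludes exactly the inputs on which Python A raises IndexError: some index in
-- valid_indices out of range for zone (both A and B raise there).
def Pre_pick_cards_from_zone (zone : List (Int × Int)) (valid_indices : List Int) (direction : Int) (ref_card : Int × Int) (discard_pile : List (Int × Int)) : Prop :=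
  ∀ i ∈ valid_indices, PySem.Raise.InRange zone.length i
instance (zone : List (Int × Int)) (valid_indices : List Int) (direction : Int) (ref_card : Int × Int) (discard_pile : List (Int × Int)) : Decidable (Pre_pick_cards_from_zone zone valid_indices direction ref_card discard_pile) := by unfold Pre_pick_cards_from_zone; infer_instance

def pvWitness_pick_cards_from_zone : (List (Int × Int)) × List Int × Int × (Int × Int) × (List (Int × Int)) :=
  ([(3, 1), (2, 0), (3, 5)], [0, 1], 1, (0, 0), [])

def Spec_pick_cards_from_zone (zone : List (Int × Int)) (valid_indices : List Int) (direction : Int) (ref_card : Int × Int) (discard_pile : List (Int × Int)) (out : List Int) : Prop := out = pick_cards_from_zone_alt zone valid_indices direction ref_card discard_pile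
instance (zone : List (Int × Int)) (valid_indices : List Int) (direction : Int) (ref_card : Int × Int) (discard_pile : List (Int × Int)) (out : List Int) : Decidable (Spec_pick_cards_from_zone zone valid_indices direction ref_card discard_pile out) := by unfold Spec_pick_cards_from_zone; infer_instance

-- ===== CLAIM =====
def Claim_equal_pick_cards_from_zone : Prop := ∀ (zone : List (Int × Int)) (valid_indices : List Int) (direction : Int) (ref_card : Int × Int) (discard_pile : List (Int × Int)), Dom_pick_cards_from_zone zone valid_indices direction ref_card discard_pile → Pre_pick_cards_from_zone zone valid_indices direction ref_card discard_pile → Spec_pick_cards_from_zone zone valid_indices direction ref_card discard_pile (pick_cards_from_zone zone valid_indices direction ref_card discard_pile)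

-- ===== LEMMAS AND PROOFS =====

-- pickBestLoop with a some-accumulator returns the max of the accumulator and all ranks.
theorem pickBestLoop_some (zone : List (Int × Int)) (vs : List Int) (b : Int) :
    ∃ m, pickBestLoop zone vs (some b) = some m ∧
      (m = b ∨ m ∈ vs.map (fun i => (PySem.List.pyGetD zone i ((0:Int), (0:Int))).1)) ∧
      b ≤ m ∧ ∀ r ∈ vs.map (fun i => (PySem.List.pyGetD zone i ((0:Int), (0:Int))).1), r ≤ m := by
  induction vs generalizing b with
  | nil => exact ⟨b, rfl, Or.inl rfl, le_refl b, by simp⟩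
  | cons i rest ih =>
      set r := (PySem.List.pyGetD zone i ((0:Int), (0:Int))).1 with hr
      by_cases h : r > b
      · obtain ⟨m, hm, hmem, hle, hmax⟩ := ih r
        refine ⟨m, ?_, ?_, ?_, ?_⟩
        · simpa [pickBestLoop, ← hr, h] using hm
        · rcases hmem with h1 | h1
          · exact Or.inr (by simp [← hr, h1])
          · exact Or.inr (by simp [h1])
        · omega
        · intro x hx
          simp only [List.map_cons, List.mem_cons] at hx
          rcases hx with rfl | hx
          · exact hle
          · exact hmax x hx
      · obtain ⟨m, hm, hmem, hle, hmax⟩ := ih b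
        refine ⟨m, ?_, ?_, hle, ?_⟩
        · simpa [pickBestLoop, ← hr, h] using hm
        · rcases hmem with h1 | h1
          · exact Or.inl h1
          · exact Or.inr (by simp [h1])
        · intro x hx
          simp only [List.map_cons, List.mem_cons] at hx
          rcases hx with rfl | hx
          · omega
          · exact hmax x hx

-- pickBestLoop starting from none on a nonempty list returns the maximum rank.
theorem pickBestLoop_none (zone : List (Int × Int)) (i : Int) (rest : List Int) :
    ∃ m, pickBestLoop zone (i :: rest) none = some m ∧
      m ∈ (i :: rest).map (fun j => (PySem.List.pyGetD zone j ((0:Int), (0:Int))).1) ∧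
      ∀ r ∈ (i :: rest).map (fun j => (PySem.List.pyGetD zone j ((0:Int), (0:Int))).1), r ≤ m := by
  obtain ⟨m, hm, hmem, hle, hmax⟩ := pickBestLoop_some zone rest ((PySem.List.pyGetD zone i ((0:Int), (0:Int))).1)
  refine ⟨m, by simpa [pickBestLoop] using hm, ?_, ?_⟩
  · rcases hmem with h1 | h1
    · simp [h1]
    · simp [h1]
  · intro r hmr
    simp only [List.map_cons, List.mem_cons] at hmr
    rcases hmr with rfl | hmr
    · exact hle
    · exact hmax r hmr

-- A's enumerate/filterMap comprehension equals B's counter loop, at any start index.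
theorem filterMap_enumerate_eq_collect (best : Int) (zone : List (Int × Int)) (j : Int) :
    (PySem.List.enumerate zone j).filterMap
      (fun p => if p.2.1 = best then some p.1 else none) = pickCollectLoop best zone j := by
  induction zone generalizing j with
  | nil => simp [PySem.List.enumerate_nil, pickCollectLoop]
  | cons c rest ih =>
      obtain ⟨rank, suit⟩ := c
      by_cases h : rank = best <;>
        simp [PySem.List.enumerate_cons, List.filterMap_cons, h, pickCollectLoop, ih]

-- Head rank of A's descending sort equals B's running maximum.
theorem chosen_rank_eq (zone : List (Int × Int)) (valid_indices : List Int)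
    (h : valid_indices ≠ []) :
    ∃ m, pickBestLoop zone valid_indices none = some m ∧
      ((PySem.List.sorted (valid_indices.map (fun i => (i, PySem.List.pyGetD zone i ((0:Int), (0:Int))))) (fun x => x.2.1) true).headD (0, (0, 0))).2.1 = m := by
  obtain ⟨i, rest, rfl⟩ := List.exists_cons_of_ne_nil h
  obtain ⟨m, hm, hmem, hmax⟩ := pickBestLoop_none zone i rest
  refine ⟨m, hm, ?_⟩
  set vc := (i :: rest).map (fun j => (j, PySem.List.pyGetD zone j ((0:Int), (0:Int)))) with hvc
  have hvcne : vc ≠ [] := by simp [hvc]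
  obtain ⟨hd, tl, hht⟩ : ∃ hd tl, PySem.List.sorted vc (fun x => x.2.1) true = hd :: tl := by
    cases hsc : PySem.List.sorted vc (fun x => x.2.1) true with
    | nil =>
        exact absurd ((PySem.List.sorted_eq_nil_iff (xs := vc) (key := fun x => x.2.1) (rev := true)).1 hsc) hvcne
    | cons hd tl => exact ⟨hd, tl, rfl⟩
  have hhdmem : hd ∈ vc :=
    (PySem.List.mem_sorted vc (fun x => x.2.1) true hd).1 (by rw [hht]; simp)
  have hhdmax : ∀ y ∈ vc, y.2.1 ≤ hd.2.1 :=
    PySem.List.key_head_sorted_rev_ge vc (fun x => x.2.1) hht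
  have hranks : (i :: rest).map (fun j => (PySem.List.pyGetD zone j ((0:Int), (0:Int))).1)
      = vc.map (fun x => x.2.1) := by
    simp [hvc, List.map_map, Function.comp]
  rw [hht]
  simp only [List.headD_cons]
  apply le_antisymm
  · exact hmax _ (by rw [hranks]; exact List.mem_map_of_mem hhdmem)
  · rw [hranks] at hmem
    obtain ⟨y, hy, hym⟩ := List.mem_map.1 hmem
    rw [← hym]; exact hhdmax y hy

-- ===== VERDICT =====
theorem pick_cards_from_zone_spec : Claim_equal_pick_cards_from_zone := by
  intro zone valid_indices direction ref_card discard_pile _hdom _hpre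
  unfold Spec_pick_cards_from_zone pick_cards_from_zone pick_cards_from_zone_alt
  by_cases h : valid_indices = []
  · simp [h, pickBestLoop]
  · obtain ⟨m, hm, hrank⟩ := chosen_rank_eq zone valid_indices h
    simp only [h, if_false, hm, hrank]
    exact filterMap_enumerate_eq_collect m zone 0
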